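-- pv_equiv track=rewrite | github.com/anjanthapa26/Leetcode | leetcode/watering_plants.py | water_plants
-- ===== SOURCE A (Python) =====
-- def water_plants(plants,capacity):
--     opt = 0
--     counter = 0
--     flag = False
--     total_cap = capacity
--     while counter < len(plants):
--
--         if plants[counter] <= capacity:
--             capacity -= plants[counter]
--             counter +=1
--             if flag:
--                 opt += counter
--                 flag = False
--             else:
--                 opt +=1
--         else:
--             flag = True
--             opt += counter
--             capacity = total_cap
--
--     return opt
-- ===== SOURCE B (Python) =====
-- def water_plants(plants, capacity):
--     n = len(plants)
--     pref = [0]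
--     run = 0
--     for p in plants:
--         run += p
--         pref.append(run)
--     steps = 0
--     s = 0
--     while s < n:
--         e = s
--         while e < n and pref[e + 1] - pref[s] <= capacity:
--             e += 1
--         steps += e - s
--         if e < n:
--             steps += 2 * e
--         s = e
--     return steps
-- ===== Notes on version B (the rewrite author's own statement) =====
-- stated objective: alternative
-- what changed: Replaces A's flag-based per-plant simulation (which revisits a plant across two loop iterations after a refill) by a two-stage algorithm: first build the prefix-sum array, then walk the row segment by segment, finding each maximal stretch waterable on one full can by comparing prefix sums and adding its e-s watering steps plus a closed-form 2*e refill cost.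
-- outside the precondition, e.g. on water_plants([-5, 3], 1): A returns 2, B returns 2
import Mathlib
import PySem

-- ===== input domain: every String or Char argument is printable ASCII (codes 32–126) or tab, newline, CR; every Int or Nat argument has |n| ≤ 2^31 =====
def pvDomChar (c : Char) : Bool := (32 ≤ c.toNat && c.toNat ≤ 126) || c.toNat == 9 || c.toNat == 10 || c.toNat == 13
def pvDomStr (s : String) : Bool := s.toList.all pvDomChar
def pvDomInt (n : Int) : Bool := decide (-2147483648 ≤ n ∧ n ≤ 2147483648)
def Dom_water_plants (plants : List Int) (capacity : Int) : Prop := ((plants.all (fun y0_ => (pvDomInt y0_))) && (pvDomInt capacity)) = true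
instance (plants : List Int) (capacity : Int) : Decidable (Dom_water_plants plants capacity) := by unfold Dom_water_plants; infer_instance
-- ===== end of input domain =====

-- B replaces A's flag-based while-loop simulation by a two-stage algorithm: build the
-- prefix-sum array, then walk the row segment by segment (maximal stretch per full can,
-- refill cost 2*e in closed form); objective: alternative (same O(n) cost).


-- ===== PORT A =====
-- A's while loop, with fuel only to make the recursion total; under Pre_ each refill is
-- immediately followed by a watering step, so 2*len+1 fuel units always suffice.
def waterLoopA (plants : List Int) (total_cap : Int) :
    Nat → Int → Nat → Bool → Int → Int
  | 0, opt, _, _, _ => opt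
  | fuel + 1, opt, counter, flag, capacity =>
    if counter < plants.length then
      if plants.getD counter 0 ≤ capacity then
        if flag then
          waterLoopA plants total_cap fuel (opt + ((counter : Int) + 1)) (counter + 1) false
            (capacity - plants.getD counter 0)
        else
          waterLoopA plants total_cap fuel (opt + 1) (counter + 1) false
            (capacity - plants.getD counter 0)
      else
        waterLoopA plants total_cap fuel (opt + (counter : Int)) counter true total_cap
    else opt

def water_plants (plants : List Int) (capacity : Int) : Int :=
  waterLoopA plants capacity (2 * plants.length + 1) 0 0 false capacity

-- ===== PORT B =====
-- Source B's inner while loop: advance e while e < n and pref[e+1] - pref[s] <= capacity.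
def segEnd (pref : List Int) (n : Nat) (capacity : Int) (s : Nat) (e : Nat) : Nat :=
  if h : e < n ∧ PySem.List.pyGetD pref ((e : Int) + 1) 0 - PySem.List.pyGetD pref (s : Int) 0 ≤ capacity then
    segEnd pref n capacity s (e + 1)
  else e
termination_by n - e
decreasing_by omega

-- Source B's outer while loop; fuel only for totality (under Pre_ each pass advances s, so
-- n + 1 units suffice).
def altLoop (pref : List Int) (n : Nat) (capacity : Int) : Nat → Int → Nat → Int
  | 0, steps, _ => steps
  | f + 1, steps, s =>
    if s < n then
      let e := segEnd pref n capacity s s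
      altLoop pref n capacity f
        (steps + ((e : Int) - (s : Int)) + (if e < n then 2 * (e : Int) else 0)) e
    else steps

def water_plants_alt (plants : List Int) (capacity : Int) : Int :=
  let n := plants.length
  let pref := (plants.foldl (fun (st : List Int × Int) p => (st.1 ++ [st.2 + p], st.2 + p)) ([0], 0)).1
  altLoop pref n capacity (n + 1) 0 0

-- ===== PRECONDITION & SPEC =====
-- Pre_: every plant needs at most the full can (the problem's stated constraint). Outside it
-- A loops forever whenever a plant exceeds both the current and the full can (e.g. [2] with
-- capacity 1); this also excludes some inputs with negative plant amounts on which A still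
-- returns (see the cite), since checking which of those terminate would mean running the loop.
def Pre_water_plants (plants : List Int) (capacity : Int) : Prop :=
  ∀ x ∈ plants, x ≤ capacity
instance (plants : List Int) (capacity : Int) : Decidable (Pre_water_plants plants capacity) := by
  unfold Pre_water_plants; infer_instance

def pvWitness_water_plants : List Int × Int := ([2, 1, 3, 3], 4)

def Spec_water_plants (plants : List Int) (capacity : Int) (out : Int) : Prop :=
  out = water_plants_alt plants capacity
instance (plants : List Int) (capacity : Int) (out : Int) :
    Decidable (Spec_water_plants plants capacity out) := by
  unfold Spec_water_plants; infer_instance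

-- ===== CLAIM (what is proved, stated in full; the proofs are below) =====
def Claim_equal_water_plants : Prop :=
  ∀ (plants : List Int) (capacity : Int), Dom_water_plants plants capacity →
    Pre_water_plants plants capacity →
    Spec_water_plants plants capacity (water_plants plants capacity)

-- ===== LEMMAS AND PROOFS =====

-- Common middle form: the per-plant simulation written as a fold over the remaining indices,
-- refill cost 2*j+1 inlined.  Both ports are proved equal to this fold.
def simStep (plants : List Int) (capacity : Int) (st : Int × Int) (j : Int) : Int × Int :=
  if PySem.List.pyGetD plants j 0 ≤ st.2 then (st.1 + 1, st.2 - PySem.List.pyGetD plants j 0)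
  else (st.1 + 2 * j + 1, capacity - PySem.List.pyGetD plants j 0)

def foldSim (plants : List Int) (capacity : Int) (i : Int) (st : Int × Int) : Int × Int :=
  (PySem.List.pyRange i (plants.length : Int) 1).foldl (simStep plants capacity) st

-- prefix sum of the first j plants
def S (plants : List Int) (j : Nat) : Int := (plants.take j).sum

-- the tail of Source B's pref array, as a structural recursion (proof-side only)
def psums (run : Int) : List Int → List Int
  | [] => []
  | p :: ps => (run + p) :: psums (run + p) ps

theorem S_succ (plants : List Int) (k : Nat) (hk : k < plants.length) :
    S plants (k + 1) = S plants k + plants.getD k 0 := by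
  simp only [S, List.take_add_one, List.sum_append, List.getElem?_eq_getElem hk,
    Option.toList_some, List.sum_cons, List.sum_nil, List.getD_eq_getElem plants 0 hk]
  ring

theorem foldl_pref (l : List Int) : ∀ (acc : List Int) (run : Int),
    (l.foldl (fun (st : List Int × Int) p => (st.1 ++ [st.2 + p], st.2 + p)) (acc, run)).1 =
      acc ++ psums run l := by
  induction l with
  | nil => intro acc run; simp [psums]
  | cons p ps ih =>
    intro acc run
    simp only [List.foldl_cons, psums]
    rw [ih (acc ++ [run + p]) (run + p), List.append_assoc]
    rfl

theorem psums_getD : ∀ (l : List Int) (run : Int) (k : Nat), k < l.length →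
    (psums run l).getD k 0 = run + (l.take (k + 1)).sum := by
  intro l
  induction l with
  | nil => intro run k hk; simp at hk
  | cons p ps ih =>
    intro run k hk
    cases k with
    | zero => simp [psums]
    | succ k =>
      simp only [psums, List.getD_cons_succ, List.take_succ_cons, List.sum_cons]
      rw [ih (run + p) k (by simpa using hk)]
      ring

-- pref[k] (for k ≤ n) is the prefix sum S k
theorem prefGet (plants : List Int) (k : Nat) (hk : k ≤ plants.length) :
    PySem.List.pyGetD ((0 : Int) :: psums 0 plants) ((k : Nat) : Int) 0 = S plants k := by
  rw [PySem.List.pyGetD_natCast]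
  cases k with
  | zero => simp [S]
  | succ k =>
    simp only [List.getD_cons_succ]
    rw [psums_getD plants 0 k (by omega)]
    simp [S]

-- specification of the inner loop segEnd
theorem segEnd_spec (pref : List Int) (n : Nat) (cap : Int) (s : Nat) :
    ∀ e, e ≤ n →
      e ≤ segEnd pref n cap s e ∧ segEnd pref n cap s e ≤ n ∧
      (∀ k, e ≤ k → k < segEnd pref n cap s e →
        PySem.List.pyGetD pref ((k : Int) + 1) 0 - PySem.List.pyGetD pref (s : Int) 0 ≤ cap) ∧
      (segEnd pref n cap s e < n →
        ¬ (PySem.List.pyGetD pref (((segEnd pref n cap s e) : Int) + 1) 0 -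
            PySem.List.pyGetD pref (s : Int) 0 ≤ cap)) := by
  intro e
  induction e using (segEnd.induct pref n cap s) with
  | case1 e h ih =>
    intro he
    rw [segEnd, dif_pos h]
    obtain ⟨h1, h2, h3, h4⟩ := ih (by omega)
    refine ⟨by omega, h2, ?_, h4⟩
    intro k hk hk2
    rcases Nat.eq_or_lt_of_le hk with rfl | hlt
    · exact h.2
    · exact h3 k (by omega) hk2
  | case2 e h =>
    intro he
    rw [segEnd, dif_neg h]
    refine ⟨le_refl _, he, by omega, ?_⟩
    intro hen hc
    exact h ⟨hen, hc⟩

-- fold over a fully-waterable segment: waters d plants in a row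
theorem fold_seg (plants : List Int) (cap : Int) :
    ∀ (d j : Nat) (steps c : Int), j + d ≤ plants.length →
      (∀ k, j ≤ k → k < j + d → S plants (k + 1) - S plants j ≤ c) →
      (foldSim plants cap ((j : Nat) : Int) (steps, c)).1 =
        (foldSim plants cap (((j + d : Nat)) : Int) (steps + (d : Int), c - (S plants (j + d) - S plants j))).1 := by
  intro d
  induction d with
  | zero => intro j steps c _ _; simp
  | succ d ih =>
    intro j steps c hle hcond
    have hj : j < plants.length := by omega
    have hS := S_succ plants j hj
    have hpj : plants.getD j 0 ≤ c := by
      have := hcond j (le_refl j) (by omega); omega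
    unfold foldSim
    rw [PySem.List.pyRange_one_cons (by exact_mod_cast hj)]
    simp only [List.foldl_cons, simStep, PySem.List.pyGetD_natCast, if_pos hpj]
    have hcast : ((j : Int) + 1) = (((j + 1 : Nat)) : Int) := by push_cast; ring
    rw [hcast]
    have ih' := ih (j + 1) (steps + 1) (c - plants.getD j 0) (by omega) ?_
    · unfold foldSim at ih'
      have h1 : (j + 1 + d : Nat) = (j + (d + 1) : Nat) := by omega
      rw [h1] at ih'
      rw [ih']
      have hst : (steps + 1 + (d : Int),
          c - plants.getD j 0 - (S plants (j + (d + 1)) - S plants (j + 1))) =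
          (steps + ((d + 1 : Nat) : Int), c - (S plants (j + (d + 1)) - S plants j)) := by
        rw [Prod.mk.injEq]
        exact ⟨by push_cast; ring, by rw [hS]; ring⟩
      rw [hst]
    · intro k hk hk2
      have := hcond k (by omega) (by omega)
      omega

-- A's loop in the flag-false state equals the fold (given enough fuel: 2 per plant).
theorem waterLoopA_eq_foldl (plants : List Int) (capacity : Int)
    (hpre : ∀ x ∈ plants, x ≤ capacity) :
    ∀ fuel (i : Nat) (opt c : Int), 2 * (plants.length - i) < fuel →
      waterLoopA plants capacity fuel opt i false c =
        (foldSim plants capacity (i : Int) (opt, c)).1 := by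
  intro fuel
  induction fuel using Nat.strong_induction_on with
  | _ fuel ih =>
    intro i opt c hfuel
    match fuel, hfuel with
    | fuel + 1, hfuel =>
      by_cases hi : i < plants.length
      · have hpe : plants.getD i 0 = plants[i] := List.getD_eq_getElem plants 0 hi
        have hp : plants[i] ∈ plants := List.getElem_mem hi
        have hcast : ((i : Int) + 1) = ((i + 1 : Nat) : Int) := by push_cast; ring
        unfold foldSim
        rw [PySem.List.pyRange_one_cons (by exact_mod_cast hi)]
        simp only [List.foldl_cons, simStep, PySem.List.pyGetD_natCast, hpe]
        by_cases hle : plants[i] ≤ c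
        · rw [show waterLoopA plants capacity (fuel + 1) opt i false c =
              waterLoopA plants capacity fuel (opt + 1) (i + 1) false (c - plants[i]) by
              simp [waterLoopA, hi, hle]]
          rw [if_pos hle, hcast]
          exact ih fuel (by omega) (i + 1) _ _ (by omega)
        · -- refill: A takes two loop iterations (flag set, then water with flag)
          rw [show waterLoopA plants capacity (fuel + 1) opt i false c =
              waterLoopA plants capacity fuel (opt + (i : Int)) i true capacity by
              simp [waterLoopA, hi, hle]]
          obtain ⟨fuel, rfl⟩ : ∃ f, fuel = f + 1 := ⟨fuel - 1, by omega⟩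
          rw [show waterLoopA plants capacity (fuel + 1) (opt + (i : Int)) i true capacity =
              waterLoopA plants capacity fuel (opt + (i : Int) + ((i : Int) + 1)) (i + 1) false
                (capacity - plants[i]) by
              simp [waterLoopA, hi, hpre _ hp]]
          rw [if_neg hle, hcast]
          have := ih fuel (by omega) (i + 1)
            (opt + (i : Int) + (((i : Nat) : Int) + 1)) (capacity - plants[i]) (by omega)
          unfold foldSim at this
          rw [hcast] at this
          rw [show opt + 2 * (i : Int) + 1 = opt + (i : Int) + (((i + 1 : Nat)) : Int) from by
            push_cast; ring]
          exact this
      · unfold foldSim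
        rw [PySem.List.pyRange_one_eq_nil (by exact_mod_cast Nat.le_of_not_lt hi)]
        simp [waterLoopA, hi]

-- B's outer loop on the real pref array equals the fold (fuel: one unit per segment start).
theorem altLoop_eq_foldl (plants : List Int) (capacity : Int)
    (hpre : ∀ x ∈ plants, x ≤ capacity) :
    ∀ fuel (s : Nat) (steps : Int), s ≤ plants.length → plants.length - s < fuel →
      altLoop ((0 : Int) :: psums 0 plants) plants.length capacity fuel steps s =
        (foldSim plants capacity (s : Int) (steps, capacity)).1 := by
  intro fuel
  induction fuel using Nat.strong_induction_on with
  | _ fuel ih =>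
    intro s steps hs hfuel
    match fuel, hfuel with
    | fuel + 1, hfuel =>
      set P := (0 : Int) :: psums 0 plants with hP
      set n := plants.length with hn
      by_cases hsn : s < n
      · set e := segEnd P n capacity s s with he
        obtain ⟨h1, h2, h3, h4⟩ := segEnd_spec P n capacity s s (by omega)
        -- the segment advances: plants[s] ≤ capacity
        have hadv : s < e := by
          have hps : plants.getD s 0 ≤ capacity := by
            have := hpre (plants[s]'hsn) (List.getElem_mem hsn)
            rwa [List.getD_eq_getElem plants 0 hsn]
          have hcond : PySem.List.pyGetD P ((s : Int) + 1) 0 - PySem.List.pyGetD P (s : Int) 0 ≤ capacity := by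
            have hc1 : ((s : Int) + 1) = (((s + 1 : Nat)) : Int) := by push_cast; ring
            rw [hP, hc1, prefGet plants (s + 1) (by omega), prefGet plants s (by omega),
              S_succ plants s hsn]
            omega
          have : segEnd P n capacity s s = segEnd P n capacity s (s + 1) := by
            rw [segEnd, dif_pos ⟨hsn, hcond⟩]
          have h1' := (segEnd_spec P n capacity s (s + 1) (by omega)).1
          omega
        -- segment condition in terms of S
        have hseg : ∀ k, s ≤ k → k < e → S plants (k + 1) - S plants s ≤ capacity := by
          intro k hk hk2
          have := h3 k hk hk2
          rw [hP] at this
          have hc1 : ((k : Int) + 1) = (((k + 1 : Nat)) : Int) := by push_cast; ring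
          rwa [hc1, prefGet plants (k + 1) (by omega), prefGet plants s (by omega)] at this
        have hfs := fold_seg plants capacity (e - s) s steps capacity (by omega) (by
          intro k hk hk2; exact hseg k hk (by omega))
        rw [show s + (e - s) = e by omega] at hfs
        -- unfold one pass of altLoop
        rw [show altLoop P n capacity (fuel + 1) steps s =
            altLoop P n capacity fuel
              (steps + ((e : Int) - (s : Int)) + (if e < n then 2 * (e : Int) else 0)) e by
            simp [altLoop, hsn, he]]
        by_cases hen : e < n
        · -- refill at e: on the fold side the refill branch fires, then both continue from e+1 full
          have hne : ¬ plants.getD e 0 ≤ capacity - (S plants e - S plants s) := by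
            have := h4 hen
            rw [hP] at this
            have hc1 : ((e : Int) + 1) = (((e + 1 : Nat)) : Int) := by push_cast; ring
            rw [hc1, prefGet plants (e + 1) (by omega), prefGet plants s (by omega)] at this
            have hS := S_succ plants e hen
            omega
          have hpe : plants.getD e 0 ≤ capacity := by
            have := hpre (plants[e]'hen) (List.getElem_mem hen)
            rwa [List.getD_eq_getElem plants 0 hen]
          have hcast : ((e : Int) + 1) = (((e + 1 : Nat)) : Int) := by push_cast; ring
          rw [if_pos hen]
          rw [ih fuel (by omega) e _ (by omega) (by omega)]
          rw [hfs]
          unfold foldSim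
          rw [PySem.List.pyRange_one_cons (by exact_mod_cast hen)]
          simp only [List.foldl_cons, simStep, PySem.List.pyGetD_natCast, if_neg hne, if_pos hpe,
            hcast]
          congr 2
          rw [Prod.mk.injEq]
          exact ⟨by omega, rfl⟩
        · -- e = n: both sides are steps + (e - s)
          have hen' : e = n := by omega
          rw [if_neg hen, ih fuel (by omega) e _ (by omega) (by omega), hfs]
          unfold foldSim
          rw [hen', PySem.List.pyRange_one_eq_nil (by omega)]
          simp only [List.foldl_nil]
          omega
      · rw [show altLoop P n capacity (fuel + 1) steps s = steps by simp [altLoop, hsn]]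
        unfold foldSim
        rw [PySem.List.pyRange_one_eq_nil (by exact_mod_cast Nat.le_of_not_lt hsn)]
        rfl

-- ===== VERDICT (by name: the statement is the Claim_ definition above) =====
theorem water_plants_spec : Claim_equal_water_plants := by
  intro plants capacity _ hpre
  unfold Spec_water_plants water_plants water_plants_alt
  rw [waterLoopA_eq_foldl plants capacity hpre (2 * plants.length + 1) 0 0 capacity (by omega)]
  rw [foldl_pref plants [0] 0, List.singleton_append]
  rw [altLoop_eq_foldl plants capacity hpre (plants.length + 1) 0 0 (by omega) (by omega)]
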